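-- pv_equiv track=rewrite | github.com/EduardoTrettel/acl2any | common_func.py | expand_list
-- ===== SOURCE A (Python) =====
-- from itertools import product
--
-- def expand_list(lst):
--     r_lst = []
--
--     t_lst = [ [i, lst[i].split(',')] for i in range(len(lst)) if ',' in lst[i] ]
--
--     if len(t_lst):
--         i_lst = [ t[0] for t in t_lst]
--
--         for e in [ list(x) for x in product(*[t[1] for t in t_lst]) ]:
--             nl = lst[:]
--             for i in range(len(e)):
--                 nl[i_lst[i]] = e[i]
--             r_lst.append(nl)
--     else:
--         r_lst = [lst]
--
--     return r_lst
-- ===== SOURCE B (Python) =====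
-- def expand_list(lst):
--     acc = [lst]
--     for i in range(len(lst)):
--         if ',' in lst[i]:
--             fields = lst[i].split(',')
--             new_acc = []
--             for partial in acc:
--                 for f in fields:
--                     nl = partial[:]
--                     nl[i] = f
--                     new_acc.append(nl)
--             acc = new_acc
--     return acc
-- ===== Notes on version B (the rewrite author's own statement) =====
-- stated objective: simpler
-- what changed: Replaces the product-of-splits plus index-list-scatter construction with a single incremental fold over positions that rebuilds the partial-result list at each comma field, in the same lexicographic order.
import Mathlib
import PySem

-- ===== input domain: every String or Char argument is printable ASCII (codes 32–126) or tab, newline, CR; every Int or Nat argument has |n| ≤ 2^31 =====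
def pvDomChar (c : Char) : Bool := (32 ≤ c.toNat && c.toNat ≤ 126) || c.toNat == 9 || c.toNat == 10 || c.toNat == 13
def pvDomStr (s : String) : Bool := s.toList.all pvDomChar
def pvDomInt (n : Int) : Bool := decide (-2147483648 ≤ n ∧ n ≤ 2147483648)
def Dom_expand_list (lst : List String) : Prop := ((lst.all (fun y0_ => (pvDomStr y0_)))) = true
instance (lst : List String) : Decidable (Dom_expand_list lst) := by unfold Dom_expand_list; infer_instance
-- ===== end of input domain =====

-- B replaces the itertools.product-then-scatter construction with an incremental fold over
-- positions (simpler decomposition, same output order); return-value equivalence only.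

-- s.split(',') — the separator is the literal nonempty ",", so PySem.Str.split? is always some
def splitComma (s : String) : List String := (PySem.Str.split? s ",").getD []

-- ===== PORT A =====
-- itertools.product(*factors), lexicographic (first factor varies slowest), tuples as lists
def pyProduct : List (List String) → List (List String)
  | [] => [[]]
  | l :: ls => l.flatMap (fun x => (pyProduct ls).map (x :: ·))

def expand_list (lst : List String) : List (List String) :=
  let t_lst : List (Nat × List String) :=
    ((List.range lst.length).filter (fun i => PySem.Str.isIn "," (lst.getD i ""))).map
      (fun i => (i, splitComma (lst.getD i "")))
  if t_lst.length ≠ 0 then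
    let i_lst := t_lst.map Prod.fst
    (pyProduct (t_lst.map Prod.snd)).map (fun e =>
      (List.range e.length).foldl (fun nl i => nl.set (i_lst.getD i 0) (e.getD i "")) lst)
  else [lst]

-- ===== PORT B =====
def expand_list_alt (lst : List String) : List (List String) :=
  (List.range lst.length).foldl (fun acc i =>
    if PySem.Str.isIn "," (lst.getD i "") then
      acc.flatMap (fun p => (splitComma (lst.getD i "")).map (fun f => p.set i f))
    else acc) [lst]

-- ===== PRECONDITION & SPEC =====
def Spec_expand_list (lst : List String) (out : List (List String)) : Prop := out = expand_list_alt lst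
instance (lst : List String) (out : List (List String)) : Decidable (Spec_expand_list lst out) := by unfold Spec_expand_list; infer_instance

-- ===== CLAIM (what is proved, stated in full; the proofs are below) =====
def Claim_equal_expand_list : Prop := ∀ (lst : List String), Dom_expand_list lst → Spec_expand_list lst (expand_list lst)

-- ===== LEMMAS AND PROOFS =====

-- the list of (index, chosen field) assignment lists, in product order
def assigns : List (Nat × List String) → List (List (Nat × String))
  | [] => [[]]
  | (i, fs) :: ts => fs.flatMap (fun f => (assigns ts).map ((i, f) :: ·))

-- apply a list of assignments to lst
def applyAs (lst : List String) (l : List (Nat × String)) : List String :=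
  l.foldl (fun nl p => nl.set p.1 p.2) lst

-- the comma positions below k with their split fields
def upTo (lst : List String) (k : Nat) : List (Nat × List String) :=
  ((List.range k).filter (fun i => PySem.Str.isIn "," (lst.getD i ""))).map
    (fun i => (i, splitComma (lst.getD i "")))

theorem length_mem_pyProduct (ls : List (List String)) (e : List String)
    (h : e ∈ pyProduct ls) : e.length = ls.length := by
  induction ls generalizing e with
  | nil => simp [pyProduct] at h; simp [h]
  | cons l ls ih =>
    simp [pyProduct] at h
    obtain ⟨x, _, e', he', rfl⟩ := h
    simp [ih e' he']

theorem foldl_range_getD {α β : Type} (zs : List α) (d : α) (g : β → α → β) (init : β) :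
    (List.range zs.length).foldl (fun acc i => g acc (zs.getD i d)) init = zs.foldl g init := by
  induction zs using List.reverseRecOn generalizing init with
  | nil => simp
  | append_singleton ys y ih =>
    have h1 : List.foldl (fun acc i => g acc ((ys ++ [y]).getD i d)) init (List.range ys.length)
        = List.foldl (fun acc i => g acc (ys.getD i d)) init (List.range ys.length) :=
      PySem.List.foldl_congr_mem _ _ _ _ (fun acc i hi => by
        rw [List.mem_range] at hi
        congr 1
        simp [List.getD, List.getElem?_append_left hi])
    rw [List.length_append, List.length_singleton, List.range_succ, List.foldl_append,
        List.foldl_append, h1, ih]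
    simp [List.getD]

theorem scatter_eq_applyAs (il : List Nat) (e : List String) (lst : List String)
    (h : e.length = il.length) :
    (List.range e.length).foldl (fun nl i => nl.set (il.getD i 0) (e.getD i "")) lst
      = applyAs lst (il.zip e) := by
  have hzl : (il.zip e).length = e.length := by simp [h]
  rw [show List.range e.length = List.range (il.zip e).length from by rw [hzl]]
  rw [PySem.List.foldl_congr_mem _ _
      (fun nl i => nl.set ((il.zip e).getD i (0, "")).1 ((il.zip e).getD i (0, "")).2) lst
      (fun nl i hi => by
        rw [List.mem_range] at hi
        have hi2 : i < (il.zip e).length := hi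
        have hie : i < e.length := by omega
        have hii : i < il.length := by omega
        simp [List.getD, hie, hii, List.getElem_zip])]
  exact foldl_range_getD (il.zip e) (0, "") (fun nl p => nl.set p.1 p.2) lst

theorem pyProduct_zip_eq_assigns (ts : List (Nat × List String)) :
    (pyProduct (ts.map Prod.snd)).map (fun e => (ts.map Prod.fst).zip e) = assigns ts := by
  induction ts with
  | nil => simp [pyProduct, assigns]
  | cons t ts ih =>
    obtain ⟨i, fs⟩ := t
    simp only [List.map_cons, pyProduct, assigns, List.map_flatMap, List.map_map]
    refine List.flatMap_congr (fun x _ => ?_)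
    rw [← ih, List.map_map]
    refine List.map_congr_left (fun e _ => ?_)
    simp [Function.comp]

theorem assigns_append_single (ts : List (Nat × List String)) (i : Nat) (fs : List String) :
    assigns (ts ++ [(i, fs)])
      = (assigns ts).flatMap (fun l => fs.map (fun f => l ++ [(i, f)])) := by
  induction ts with
  | nil =>
    simp only [List.nil_append, assigns, List.flatMap_cons, List.flatMap_nil]
    induction fs <;> simp_all
  | cons t ts ih =>
    obtain ⟨j, gs⟩ := t
    simp only [List.cons_append, assigns, ih, List.map_flatMap, List.map_map]
    rw [List.flatMap_assoc]
    refine List.flatMap_congr (fun g _ => ?_)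
    rw [List.flatMap_map]
    refine List.flatMap_congr (fun l _ => ?_)
    simp [Function.comp]

theorem alt_loop_eq (lst : List String) (k : Nat) :
    (List.range k).foldl (fun acc i =>
      if PySem.Str.isIn "," (lst.getD i "") then
        acc.flatMap (fun p => (splitComma (lst.getD i "")).map (fun f => p.set i f))
      else acc) [lst]
    = (assigns (upTo lst k)).map (applyAs lst) := by
  induction k with
  | zero => simp [upTo, assigns, applyAs]
  | succ k ih =>
    rw [List.range_succ, List.foldl_append, ih]
    simp only [List.foldl_cons, List.foldl_nil]
    by_cases hc : PySem.Str.isIn "," (lst.getD k "") = true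
    · have hupTo : upTo lst (k + 1)
          = upTo lst k ++ [(k, splitComma (lst.getD k ""))] := by
        simp only [upTo, List.range_succ, List.filter_append, List.filter_cons, List.filter_nil, hc]
        simp
      rw [if_pos hc, hupTo, assigns_append_single, List.map_flatMap, List.flatMap_map]
      refine List.flatMap_congr (fun l _ => ?_)
      rw [List.map_map]
      refine List.map_congr_left (fun f _ => ?_)
      simp [Function.comp, applyAs, List.foldl_append]
    · have hupTo : upTo lst (k + 1) = upTo lst k := by
        simp only [upTo, List.range_succ, List.filter_append, List.filter_cons, List.filter_nil,
          hc]
        simp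
      rw [if_neg hc, hupTo]

theorem A_eq (lst : List String) :
    expand_list lst = (assigns (upTo lst lst.length)).map (applyAs lst) := by
  simp only [expand_list]
  have hX : upTo lst lst.length
      = ((List.range lst.length).filter (fun i => PySem.Str.isIn "," (lst.getD i ""))).map
          (fun i => (i, splitComma (lst.getD i ""))) := rfl
  rw [← hX]
  by_cases h : (upTo lst lst.length).length ≠ 0
  · rw [if_pos h, ← pyProduct_zip_eq_assigns, List.map_map]
    refine List.map_congr_left (fun e he => ?_)
    have hlen : e.length = ((upTo lst lst.length).map Prod.fst).length := by
      rw [length_mem_pyProduct _ e he]; simp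
    simp only [Function.comp]
    exact scatter_eq_applyAs _ e lst hlen
  · rw [if_neg h]
    push Not at h
    rw [List.length_eq_zero_iff] at h
    simp [h, assigns, applyAs]

-- ===== VERDICT (by name: the statement is the Claim_ definition above) =====
theorem expand_list_spec : Claim_equal_expand_list := by
  intro lst _
  show expand_list lst = expand_list_alt lst
  rw [A_eq, expand_list_alt, alt_loop_eq lst lst.length]
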